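-- pv_equiv track=rewrite | github.com/wuemily2/goozebot | flexible_input.py | check_start_contents_gooze
-- ===== SOURCE A (Python) =====
-- check_list_goose = ["gooz", "gooze", "goos", "gose", "goose", "guse",
--                     "guuuse",
--                     "guse"]
--
-- def check_start_contents_gooze(message_context: str):
--     # Next plan = Check against various iterations of gooz
--     check_list_dumb = ["dumb", "dum", "stupid", "vicious", "retarded", "sucks",
--                        "suck", "horrible", "bad", "trash", "eatpoo", "poo"]
--     # Read in a list of insults
--
--     message_context = message_context.lower()
--     message_context = message_context.replace(" ", "")
--
--     for goose in check_list_goose: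
--         for dumb in check_list_dumb:
--             if message_context.startswith(goose + dumb) or \
--                     message_context.startswith(dumb + goose) or \
--                     dumb in message_context and goose in message_context:
--                 return True
--     return False
-- ===== SOURCE B (Python) =====
-- check_list_goose = ["gooz", "gooze", "goos", "gose", "goose", "guse",
--                     "guuuse",
--                     "guse"]
--
-- def check_start_contents_gooze(message_context: str):
--     check_list_dumb = ["dumb", "dum", "stupid", "vicious", "retarded", "sucks",
--                        "suck", "horrible", "bad", "trash", "eatpoo", "poo"]
--     m = message_context.lower().replace(" ", "")
--     return any(g in m for g in check_list_goose) and \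
--            any(d in m for d in check_list_dumb)
-- ===== Notes on version B (the rewrite author's own statement) =====
-- stated objective: faster
-- what changed: Replaced the nested goose x insult pair loop with startswith checks (96 pair conditions, each scanning the message) by two independent existence scans (any goose word present AND any insult word present), valid because each startswith(g+d)/startswith(d+g) hit already implies both substrings occur.
import Mathlib
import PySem

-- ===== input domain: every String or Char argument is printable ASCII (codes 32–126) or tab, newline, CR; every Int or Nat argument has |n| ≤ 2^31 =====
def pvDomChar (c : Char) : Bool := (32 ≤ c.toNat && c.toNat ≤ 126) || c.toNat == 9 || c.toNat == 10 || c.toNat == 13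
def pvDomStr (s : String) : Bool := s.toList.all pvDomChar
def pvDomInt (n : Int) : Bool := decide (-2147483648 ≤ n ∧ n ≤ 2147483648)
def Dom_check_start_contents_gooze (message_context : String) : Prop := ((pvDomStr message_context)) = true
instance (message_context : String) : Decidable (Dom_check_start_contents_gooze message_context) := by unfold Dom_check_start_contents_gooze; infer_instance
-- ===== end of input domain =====

-- B replaces A's nested goose×insult pair loop (with redundant startswith checks) by two
-- independent existence scans; equivalence on all inputs is proved below (objective: simpler).

-- ===== PORT A =====
def pvGooseList : List String := ["gooz", "gooze", "goos", "gose", "goose", "guse", "guuuse", "guse"]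

def pvDumbList : List String :=
  ["dumb", "dum", "stupid", "vicious", "retarded", "sucks",
   "suck", "horrible", "bad", "trash", "eatpoo", "poo"]

-- the body of A's if: startswith(g+d) or startswith(d+g) or (d in m and g in m)
def pvCond (m g d : String) : Bool :=
  PySem.Str.startswith m (g ++ d) || PySem.Str.startswith m (d ++ g) ||
    (PySem.Str.isIn d m && PySem.Str.isIn g m)

-- A's inner 'for dumb in check_list_dumb' loop with its early return
def pvInner (m g : String) : List String → Bool
  | [] => false
  | d :: ds => if pvCond m g d then true else pvInner m g ds

-- A's outer 'for goose in check_list_goose' loop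
def pvOuter (m : String) (dumb : List String) : List String → Bool
  | [] => false
  | g :: gs => if pvInner m g dumb then true else pvOuter m dumb gs

def check_start_contents_gooze (message_context : String) : Bool :=
  let m := PySem.Str.replace (PySem.Str.lower message_context) " " ""
  pvOuter m pvDumbList pvGooseList

-- ===== PORT B =====
def check_start_contents_gooze_alt (message_context : String) : Bool :=
  let m := PySem.Str.replace (PySem.Str.lower message_context) " " ""
  pvGooseList.any (fun g => PySem.Str.isIn g m) &&
    pvDumbList.any (fun d => PySem.Str.isIn d m)

-- ===== PRECONDITION & SPEC =====
def Spec_check_start_contents_gooze (message_context : String) (out : Bool) : Prop := out = check_start_contents_gooze_alt message_context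
instance (message_context : String) (out : Bool) : Decidable (Spec_check_start_contents_gooze message_context out) := by unfold Spec_check_start_contents_gooze; infer_instance

-- ===== CLAIM (what is proved, stated in full; the proofs are below) =====
def Claim_equal_check_start_contents_gooze : Prop := ∀ (message_context : String), Dom_check_start_contents_gooze message_context → Spec_check_start_contents_gooze message_context (check_start_contents_gooze message_context)

-- ===== LEMMAS AND PROOFS =====

-- the startswith disjuncts are subsumed by the '∈' conjunct, so the pair condition
-- is just 'g occurs and d occurs'
lemma pvCond_eq (m g d : String) :
    pvCond m g d = (PySem.Str.isIn g m && PySem.Str.isIn d m) := by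
  rw [Bool.eq_iff_iff]
  simp only [pvCond, Bool.or_eq_true, Bool.and_eq_true,
    PySem.Str.startswith_eq, PySem.Chars.startswith_iff, PySem.Str.isIn_iff_infix,
    String.toList_append]
  constructor
  · rintro ((h | h) | ⟨hd, hg⟩)
    · exact ⟨((List.prefix_append _ _).trans h).isInfix,
        ((List.suffix_append _ _).isInfix.trans h.isInfix)⟩
    · exact ⟨((List.suffix_append _ _).isInfix.trans h.isInfix),
        ((List.prefix_append _ _).trans h).isInfix⟩
    · exact ⟨hg, hd⟩
  · rintro ⟨hg, hd⟩
    exact Or.inr ⟨hd, hg⟩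

lemma pvInner_eq (m g : String) (ds : List String) :
    pvInner m g ds = (PySem.Str.isIn g m && ds.any (fun d => PySem.Str.isIn d m)) := by
  induction ds with
  | nil => simp [pvInner]
  | cons d ds ih =>
    simp only [pvInner, pvCond_eq, ih, List.any_cons]
    cases PySem.Str.isIn g m <;> cases PySem.Str.isIn d m <;> simp

lemma pvOuter_eq (m : String) (dumb gs : List String) :
    pvOuter m dumb gs =
      (gs.any (fun g => PySem.Str.isIn g m) && dumb.any (fun d => PySem.Str.isIn d m)) := by
  induction gs with
  | nil => simp [pvOuter]
  | cons g gs ih =>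
    simp only [pvOuter, pvInner_eq, ih, List.any_cons]
    cases PySem.Str.isIn g m <;> cases dumb.any (fun d => PySem.Str.isIn d m) <;> simp

-- ===== VERDICT (by name: the statement is the Claim_ definition above) =====
theorem check_start_contents_gooze_spec : Claim_equal_check_start_contents_gooze := by
  intro message_context _
  unfold Spec_check_start_contents_gooze check_start_contents_gooze check_start_contents_gooze_alt
  exact pvOuter_eq _ _ _
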